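-- pv_equiv track=rewrite | github.com/andreweckford/PatchClampFactorGraphEM | resultHandling/resultHandler.py | __openCloseIndices
-- ===== SOURCE A (Python) =====
-- def __openCloseIndices(v):
--     # initial state
--     currentLocation = 1
--     closingIndices = []
--     openingIndices = []
--     closedStates = ['0.0','1.0','2.0','5.0','6.0']
--     openStates = ['3.0','4.0']
--
--     while (currentLocation < len(v)):
--
--         if (v[currentLocation-1] in closedStates) and (v[currentLocation] in openStates):
--             openingIndices.append(currentLocation)
--         elif (v[currentLocation-1] in openStates) and (v[currentLocation] in closedStates):
--             closingIndices.append(currentLocation)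
--         currentLocation += 1
--
--     return openingIndices,closingIndices
-- ===== SOURCE B (Python) =====
-- def __openCloseIndices(v):
--     # Run-length-encoding version: compress the sequence into runs of equal
--     # category (closed=0 / open=1 / other=2); transitions can only occur at
--     # run boundaries, so emit them from adjacent run pairs.
--     closedStates = {'0.0', '1.0', '2.0', '5.0', '6.0'}
--     openStates = {'3.0', '4.0'}
--
--     def cat(x):
--         if x in closedStates:
--             return 0
--         if x in openStates:
--             return 1
--         return 2
--
--     runs = []  # (category, start index) run-length encoding
--     for i, x in enumerate(v):
--         c = cat(x)
--         if not runs or runs[-1][0] != c: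
--             runs.append((c, i))
--
--     opening = []
--     closing = []
--     for (c1, _), (c2, s2) in zip(runs, runs[1:]):
--         if (c1, c2) == (0, 1):
--             opening.append(s2)
--         elif (c1, c2) == (1, 0):
--             closing.append(s2)
--     return opening, closing
-- ===== Notes on version B (the rewrite author's own statement) =====
-- stated objective: alternative
-- what changed: Replaced A's single index-based while loop testing both neighbours' membership at every position with a run-length-encoding algorithm: first compress the sequence into runs of equal category (closed/open/other) with their start indices, then emit opening/closing indices only at the boundaries between adjacent runs.
import Mathlib
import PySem

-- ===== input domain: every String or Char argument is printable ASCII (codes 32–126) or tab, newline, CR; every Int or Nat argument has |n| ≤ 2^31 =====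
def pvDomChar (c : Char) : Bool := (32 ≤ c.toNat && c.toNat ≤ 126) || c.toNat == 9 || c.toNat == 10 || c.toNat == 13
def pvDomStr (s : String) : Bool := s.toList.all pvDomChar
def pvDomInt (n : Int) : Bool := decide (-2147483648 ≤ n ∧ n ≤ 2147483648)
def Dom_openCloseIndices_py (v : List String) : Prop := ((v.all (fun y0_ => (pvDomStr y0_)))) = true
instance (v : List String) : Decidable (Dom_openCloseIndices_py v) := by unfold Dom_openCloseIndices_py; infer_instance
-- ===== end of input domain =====

-- B replaces A's index-based pairwise while loop by a run-length-encoding algorithm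
-- (compress the category sequence into runs, then emit transitions at run boundaries);
-- same cost, alternative structure.

-- ===== PORT A =====
def pvClosedStates : List String := ["0.0", "1.0", "2.0", "5.0", "6.0"]
def pvOpenStates : List String := ["3.0", "4.0"]

-- the while loop of A, index currentLocation = i; v[i-1]/v[i] are always in range when i < len v
def pvLoopA (v : List String) (i : Nat) (opening closing : List Int) : List Int × List Int :=
  if h : i < v.length then
    if v.getD (i - 1) "" ∈ pvClosedStates ∧ v.getD i "" ∈ pvOpenStates then
      pvLoopA v (i + 1) (opening ++ [(i : Int)]) closing
    else if v.getD (i - 1) "" ∈ pvOpenStates ∧ v.getD i "" ∈ pvClosedStates then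
      pvLoopA v (i + 1) opening (closing ++ [(i : Int)])
    else
      pvLoopA v (i + 1) opening closing
  else
    (opening, closing)
termination_by v.length - i

def openCloseIndices_py (v : List String) : List Int × List Int :=
  pvLoopA v 1 [] []

-- ===== PORT B =====
def pvCat (x : String) : Int :=
  if x ∈ pvClosedStates then 0 else if x ∈ pvOpenStates then 1 else 2

-- first pass of Source B: run-length encode into (category, start index), appending a run
-- whenever the category differs from the last run's (or the list is empty)
def pvRuns (v : List String) (i : Int) (runs : List (Int × Int)) : List (Int × Int) :=
  match v with
  | [] => runs
  | x :: rest =>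
    let c := pvCat x
    if runs = [] ∨ (runs.getLast?.map Prod.fst ≠ some c) then
      pvRuns rest (i + 1) (runs ++ [(c, i)])
    else
      pvRuns rest (i + 1) runs

-- second pass of Source B: zip(runs, runs[1:]) with the two append branches
def pvScanRuns (ps : List ((Int × Int) × (Int × Int))) (opening closing : List Int) :
    List Int × List Int :=
  match ps with
  | [] => (opening, closing)
  | ((c1, _), (c2, s2)) :: rest =>
    if c1 = 0 ∧ c2 = 1 then pvScanRuns rest (opening ++ [s2]) closing
    else if c1 = 1 ∧ c2 = 0 then pvScanRuns rest opening (closing ++ [s2])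
    else pvScanRuns rest opening closing

def openCloseIndices_py_alt (v : List String) : List Int × List Int :=
  let runs := pvRuns v 0 []
  pvScanRuns (runs.zip runs.tail) [] []

-- ===== PRECONDITION & SPEC =====
def Spec_openCloseIndices_py (v : List String) (out : List Int × List Int) : Prop := out = openCloseIndices_py_alt v
instance (v : List String) (out : List Int × List Int) : Decidable (Spec_openCloseIndices_py v out) := by unfold Spec_openCloseIndices_py; infer_instance

-- ===== CLAIM (what is proved, stated in full; the proofs are below) =====
def Claim_equal_openCloseIndices_py : Prop := ∀ (v : List String), Dom_openCloseIndices_py v → Spec_openCloseIndices_py v (openCloseIndices_py v)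

-- ===== LEMMAS AND PROOFS =====

-- proof-only: the pairwise scan over adjacent category pairs (intermediate between A and B)
def pvScanB (i : Nat) (ps : List (Int × Int)) (opening closing : List Int) : List Int × List Int :=
  match ps with
  | [] => (opening, closing)
  | (a, b) :: rest =>
    if a = 0 ∧ b = 1 then pvScanB (i + 1) rest (opening ++ [(i : Int)]) closing
    else if a = 1 ∧ b = 0 then pvScanB (i + 1) rest opening (closing ++ [(i : Int)])
    else pvScanB (i + 1) rest opening closing

-- proof-only: runsAux c0 i cs = the runs produced after a run of category c0 is open
def pvRunsAux (c0 : Int) (i : Int) (cs : List Int) : List (Int × Int) :=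
  match cs with
  | [] => []
  | c :: rest => if c = c0 then pvRunsAux c0 (i + 1) rest else (c, i) :: pvRunsAux c (i + 1) rest

lemma pvOpen_not_closed (s : String) (h : s ∈ pvOpenStates) : s ∉ pvClosedStates := by
  simp only [pvOpenStates, List.mem_cons, List.not_mem_nil, or_false] at h
  rcases h with h | h <;> subst h <;> decide

lemma pvCat_eq_zero (x : String) : pvCat x = 0 ↔ x ∈ pvClosedStates := by
  unfold pvCat; split_ifs with h1 h2
  · simp [h1]
  · simp [h1]
  · simp [h1]

lemma pvCat_eq_one (x : String) : pvCat x = 1 ↔ x ∈ pvOpenStates := by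
  unfold pvCat; split_ifs with h1 h2
  · simpa using fun h => (pvOpen_not_closed x h) h1
  · simp [h2]
  · simp [h2]

-- A's loop equals the pairwise scan over the category sequence
lemma pvBridgeA (v : List String) (i : Nat) (hi : 1 ≤ i) (o c : List Int) :
    pvLoopA v i o c =
      pvScanB i (((v.map pvCat).drop (i - 1)).zip ((v.map pvCat).drop i)) o c := by
  by_cases h : i < v.length
  · have h1 : i - 1 < v.length := by omega
    have hd1 : (v.map pvCat).drop (i - 1)
        = pvCat v[i - 1] :: (v.map pvCat).drop i := by
      rw [List.drop_eq_getElem_cons (by simpa using h1)]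
      congr 1
      · simp
      · congr 1; omega
    have hd2 : (v.map pvCat).drop i
        = pvCat v[i] :: (v.map pvCat).drop (i + 1) := by
      rw [List.drop_eq_getElem_cons (by simpa using h)]
      simp
    rw [pvLoopA, dif_pos h, hd1, hd2, List.zip_cons_cons, pvScanB]
    have g1 : v.getD (i - 1) "" = v[i - 1] := List.getD_eq_getElem v "" h1
    have g2 : v.getD i "" = v[i] := List.getD_eq_getElem v "" h
    rw [g1, g2]
    have e1 : (pvCat v[i - 1] = 0 ∧ pvCat v[i] = 1)
        ↔ (v[i - 1] ∈ pvClosedStates ∧ v[i] ∈ pvOpenStates) := by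
      rw [pvCat_eq_zero, pvCat_eq_one]
    have e2 : (pvCat v[i - 1] = 1 ∧ pvCat v[i] = 0)
        ↔ (v[i - 1] ∈ pvOpenStates ∧ v[i] ∈ pvClosedStates) := by
      rw [pvCat_eq_zero, pvCat_eq_one]
    have ih := fun o c => pvBridgeA v (i + 1) (by omega) o c
    have hsimp : i + 1 - 1 = i := by omega
    rw [hsimp] at ih
    by_cases hc1 : v[i - 1] ∈ pvClosedStates ∧ v[i] ∈ pvOpenStates
    · rw [if_pos hc1, if_pos (e1.mpr hc1), ih, hd2]
    · rw [if_neg hc1, if_neg (fun hh => hc1 (e1.mp hh))]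
      by_cases hc2 : v[i - 1] ∈ pvOpenStates ∧ v[i] ∈ pvClosedStates
      · rw [if_pos hc2, if_pos (e2.mpr hc2), ih, hd2]
      · rw [if_neg hc2, if_neg (fun hh => hc2 (e2.mp hh)), ih, hd2]
  · have hd : (v.map pvCat).drop i = [] := by
      apply List.drop_eq_nil_of_le; simpa using le_of_not_gt h
    rw [pvLoopA, dif_neg h, hd, List.zip_nil_right, pvScanB]
termination_by v.length - i

-- Source B's first pass, related to the accumulator-free pvRunsAux
lemma pvRuns_eq_aux (v : List String) (i : Int) (acc : List (Int × Int)) (c0 s : Int)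
    (hl : acc.getLast? = some (c0, s)) :
    pvRuns v i acc = acc ++ pvRunsAux c0 i (v.map pvCat) := by
  induction v generalizing i acc c0 s with
  | nil => simp [pvRuns, pvRunsAux]
  | cons x rest ih =>
    have hne : acc ≠ [] := by intro h; rw [h] at hl; simp at hl
    rw [pvRuns]
    simp only [hl, Option.map_some]
    by_cases hc : pvCat x = c0
    · have : ¬ (acc = [] ∨ (some c0 ≠ some (pvCat x))) := by
        simp [hne, hc]
      rw [if_neg this, ih (i + 1) acc c0 s hl]
      simp [pvRunsAux, hc]
    · have : acc = [] ∨ (some c0 ≠ some (pvCat x)) := by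
        right; simpa using fun h => hc h.symm
      rw [if_pos this, ih (i + 1) (acc ++ [(pvCat x, i)]) (pvCat x) i (by simp)]
      simp [pvRunsAux, hc, List.append_assoc]

-- the pairwise scan equals the run-pair scan, given the currently open run
lemma pvBridgeB (cs : List Int) (c0 s : Int) (i : Nat) (o c : List Int) :
    pvScanB i ((c0 :: cs).zip cs) o c =
      pvScanRuns (((c0, s) :: pvRunsAux c0 (i : Int) cs).zip (pvRunsAux c0 (i : Int) cs)) o c := by
  induction cs generalizing c0 s i o c with
  | nil => simp [pvScanB, pvScanRuns, pvRunsAux]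
  | cons c1 rest ih =>
    rw [List.zip_cons_cons, pvScanB]
    by_cases hc : c1 = c0
    · subst hc
      have h1 : ¬ (c1 = 0 ∧ c1 = 1) := by rintro ⟨h, h'⟩; omega
      have h2 : ¬ (c1 = 1 ∧ c1 = 0) := by rintro ⟨h, h'⟩; omega
      rw [if_neg h1, if_neg h2]
      have : pvRunsAux c1 (i : Int) (c1 :: rest) = pvRunsAux c1 ((i : Int) + 1) rest := by
        simp [pvRunsAux]
      rw [this]
      have := ih c1 s (i + 1) o c
      push_cast at this ⊢
      exact this
    · have hr : pvRunsAux c0 (i : Int) (c1 :: rest)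
          = (c1, (i : Int)) :: pvRunsAux c1 ((i : Int) + 1) rest := by
        simp [pvRunsAux, hc]
      rw [hr, List.zip_cons_cons, pvScanRuns]
      have ih' := fun o c => ih c1 (i : Int) (i + 1) o c
      push_cast at ih'
      by_cases h1 : c0 = 0 ∧ c1 = 1
      · rw [if_pos h1, if_pos h1, ih']
      · rw [if_neg h1, if_neg h1]
        by_cases h2 : c0 = 1 ∧ c1 = 0
        · rw [if_pos h2, if_pos h2, ih']
        · rw [if_neg h2, if_neg h2, ih']

-- ===== VERDICT (by name: the statement is the Claim_ definition above) =====
theorem openCloseIndices_py_spec : Claim_equal_openCloseIndices_py := by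
  intro v _
  unfold Spec_openCloseIndices_py openCloseIndices_py openCloseIndices_py_alt
  rw [pvBridgeA v 1 (le_refl 1)]
  simp only [List.drop_one, Nat.sub_self, List.drop_zero]
  cases v with
  | nil => simp [pvRuns, pvScanB, pvScanRuns]
  | cons x rest =>
    have hr : pvRuns (x :: rest) 0 [] = (pvCat x, 0) :: pvRunsAux (pvCat x) 1 (rest.map pvCat) := by
      rw [pvRuns]
      rw [if_pos (Or.inl rfl)]
      simpa using pvRuns_eq_aux rest 1 [(pvCat x, 0)] (pvCat x) 0 (by simp)
    rw [hr]
    have := pvBridgeB (rest.map pvCat) (pvCat x) 0 1 [] []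
    push_cast at this
    simpa [List.map_cons, List.tail_cons] using this
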